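-- pv_equiv track=rewrite | github.com/adamtaufiqurrahman28-arch/Cendol-dawet | utils/parsing.py | pick_columns
-- ===== SOURCE A (Python) =====
-- from typing import Any
--
-- def pick_columns(rows: list[dict[str, Any]], limit: int = 10) -> list[str]:
--     priority = [
--         "LastSeen",
--         "FirstSeen",
--         "ComputerName",
--         "UserName",
--         "ContextBaseFileName",
--         "ParentBaseFileName",
--         "FileName",
--         "Verdict",
--         "Severity",
--         "Reason",
--         "Hits",
--         "CommandLine",
--         "SampleDecodedCmd",
--         "SampleDomains",
--         "SampleRemotes",
--     ]
--     seen: list[str] = []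
--     all_keys: list[str] = []
--     for row in rows:
--         for key in row.keys():
--             if key not in all_keys:
--                 all_keys.append(key)
--
--     for key in priority:
--         if key in all_keys and key not in seen:
--             seen.append(key)
--     for key in all_keys:
--         if key not in seen:
--             seen.append(key)
--     return seen[:limit]
-- ===== SOURCE B (Python) =====
-- from typing import Any
--
--
-- def pick_columns(rows: list[dict[str, Any]], limit: int = 10) -> list[str]:
--     priority = [
--         "LastSeen",
--         "FirstSeen",
--         "ComputerName",
--         "UserName",
--         "ContextBaseFileName",
--         "ParentBaseFileName",
--         "FileName",
--         "Verdict",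
--         "Severity",
--         "Reason",
--         "Hits",
--         "CommandLine",
--         "SampleDecodedCmd",
--         "SampleDomains",
--         "SampleRemotes",
--     ]
--     all_keys = list(dict.fromkeys(key for row in rows for key in row))
--     rank = {key: i for i, key in enumerate(priority)}
--     pos = {key: len(priority) + i for i, key in enumerate(all_keys)}
--     ordered = sorted(all_keys, key=lambda k: rank[k] if k in rank else pos[k])
--     return ordered[:limit]
-- ===== Notes on version B (the rewrite author's own statement) =====
-- stated objective: idiomatic
-- what changed: Replaces the three membership-scanning accumulator loops with dict.fromkeys for the ordered unique key list plus one stable sorted() call over an injective rank (priority index, or len(priority)+first-seen position for the rest), then a single [:limit] slice.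
import Mathlib
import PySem

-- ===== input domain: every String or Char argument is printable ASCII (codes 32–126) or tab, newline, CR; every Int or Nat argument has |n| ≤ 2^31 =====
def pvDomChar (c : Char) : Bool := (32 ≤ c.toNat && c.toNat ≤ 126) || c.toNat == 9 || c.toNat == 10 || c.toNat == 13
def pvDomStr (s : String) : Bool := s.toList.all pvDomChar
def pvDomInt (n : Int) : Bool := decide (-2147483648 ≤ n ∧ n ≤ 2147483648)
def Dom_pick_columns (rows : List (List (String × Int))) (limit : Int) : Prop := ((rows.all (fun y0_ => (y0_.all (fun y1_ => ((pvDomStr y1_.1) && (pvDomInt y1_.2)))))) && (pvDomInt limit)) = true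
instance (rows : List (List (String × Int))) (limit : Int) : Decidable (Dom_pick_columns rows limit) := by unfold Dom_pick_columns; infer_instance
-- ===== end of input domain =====

-- B replaces A's three membership-scanning accumulator loops with dict.fromkeys plus one
-- stable sort under an injective rank and a single slice (objective: idiomatic).

-- the shared literal priority list (pure data, used by both ports)
def pvPriority : List String :=
  [ "LastSeen", "FirstSeen", "ComputerName", "UserName", "ContextBaseFileName",
    "ParentBaseFileName", "FileName", "Verdict", "Severity", "Reason", "Hits",
    "CommandLine", "SampleDecodedCmd", "SampleDomains", "SampleRemotes" ]

-- ===== PORT A =====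
def pick_columns (rows : List (List (String × Int))) (limit : Int) : List String :=
  let priority := pvPriority
  let all_keys : List String :=
    rows.foldl (fun acc row =>
      row.foldl (fun acc2 kv => if acc2.contains kv.1 then acc2 else acc2 ++ [kv.1]) acc) []
  let seen : List String :=
    priority.foldl (fun s key =>
      if all_keys.contains key && !s.contains key then s ++ [key] else s) []
  let seen2 : List String :=
    all_keys.foldl (fun s key => if !s.contains key then s ++ [key] else s) seen
  PySem.List.slice seen2 none (some limit)

-- ===== PORT B =====
def pick_columns_alt (rows : List (List (String × Int))) (limit : Int) : List String :=
  let priority := pvPriority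
  let all_keys : List String := PySem.List.dedup (rows.flatMap (fun row => row.map Prod.fst))
  let rank : PySem.Dict String Int :=
    (PySem.List.enumerate priority).foldl (fun d p => d.insert p.2 p.1) PySem.Dict.empty
  let pos : PySem.Dict String Int :=
    (PySem.List.enumerate all_keys).foldl
      (fun d p => d.insert p.2 ((priority.length : Int) + p.1)) PySem.Dict.empty
  let ordered := PySem.List.sorted all_keys
    (fun k => if rank.contains k then rank.getD k 0 else pos.getD k 0)
  PySem.List.slice ordered none (some limit)

-- ===== PRECONDITION & SPEC =====
def Spec_pick_columns (rows : List (List (String × Int))) (limit : Int) (out : List String) : Prop := out = pick_columns_alt rows limit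
instance (rows : List (List (String × Int))) (limit : Int) (out : List String) : Decidable (Spec_pick_columns rows limit out) := by unfold Spec_pick_columns; infer_instance

-- ===== CLAIM (what is proved, stated in full; the proofs are below) =====
def Claim_equal_pick_columns : Prop := ∀ (rows : List (List (String × Int))) (limit : Int), Dom_pick_columns rows limit → Spec_pick_columns rows limit (pick_columns rows limit)

-- ===== LEMMAS AND PROOFS =====

-- A's nested key-collection loop is exactly Set.ofList (dedup) of the flattened key list.
theorem foldl_add_flatMap (rows : List (List (String × Int))) (init : List String) :
    rows.foldl (fun acc row =>
      row.foldl (fun acc2 kv => if acc2.contains kv.1 then acc2 else acc2 ++ [kv.1]) acc) init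
      = (rows.flatMap (fun row => row.map Prod.fst)).foldl PySem.Set.add init := by
  induction rows generalizing init with
  | nil => rfl
  | cons r t ih =>
      simp only [List.foldl_cons, List.flatMap_cons, List.foldl_append, ih, List.foldl_map]
      rfl

-- A's first seen-loop over a nodup list disjoint from the accumulator appends the filter.
theorem foldl_seen1 (c : String → Bool) (p s : List String) (hp : p.Nodup)
    (hd : ∀ k ∈ p, k ∉ s) :
    p.foldl (fun s key => if c key && !s.contains key then s ++ [key] else s) s
      = s ++ p.filter c := by
  induction p generalizing s with
  | nil => simp
  | cons x t ih =>
      have hx : x ∉ s := hd x (by simp)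
      have hxt : x ∉ t := (List.nodup_cons.mp hp).1
      simp only [List.foldl_cons, List.filter_cons]
      by_cases hc : c x = true
      · have h1 : (if c x && !s.contains x then s ++ [x] else s) = s ++ [x] := by
          simp [hc, hx]
        rw [h1, ih (s ++ [x]) (List.nodup_cons.mp hp).2 ?_]
        · simp [hc]
        · intro k hk
          simp only [List.mem_append, List.mem_singleton, not_or]
          exact ⟨hd k (List.mem_cons_of_mem _ hk), fun h => hxt (h ▸ hk)⟩
      · have h1 : (if c x && !s.contains x then s ++ [x] else s) = s := by
          simp [hc]
        rw [h1, ih s (List.nodup_cons.mp hp).2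
          (fun k hk => hd k (List.mem_cons_of_mem _ hk))]
        simp [hc]

-- A's second seen-loop over a nodup list appends the keys not already seen.
theorem foldl_seen2 (xs s : List String) (hx : xs.Nodup) :
    xs.foldl (fun s key => if !s.contains key then s ++ [key] else s) s
      = s ++ xs.filter (fun k => !s.contains k) := by
  induction xs generalizing s with
  | nil => simp
  | cons x t ih =>
      have hxt : x ∉ t := (List.nodup_cons.mp hx).1
      simp only [List.foldl_cons, List.filter_cons]
      by_cases hm : s.contains x = true
      · have hms : x ∈ s := List.contains_iff_mem.mp hm
        rw [if_neg (by simp [hms]), if_neg (by simp [hms]), ih s (List.nodup_cons.mp hx).2]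
      · have hms : x ∉ s := fun h => hm (List.contains_iff_mem.mpr h)
        rw [if_pos (by simp [hms]), if_pos (by simp [hms]),
          ih (s ++ [x]) (List.nodup_cons.mp hx).2]
        simp only [List.append_assoc, List.singleton_append, List.cons.injEq,
          List.append_cancel_left_eq, true_and]
        apply List.filter_congr
        intro k hk
        have hkx : k ≠ x := fun h => hxt (h ▸ hk)
        simp [hkx]

-- a nodup list is strictly increasing under its own idxOf
theorem pairwise_idxOf_of_nodup (xs : List String) (hx : xs.Nodup) :
    xs.Pairwise (fun a b => List.idxOf a xs < List.idxOf b xs) := by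
  rw [List.pairwise_iff_getElem]
  intro i j hi hj hij
  have hni := List.Nodup.idxOf_getElem hx i hi
  have hnj := List.Nodup.idxOf_getElem hx j hj
  rw [hni, hnj]; exact hij

-- the dict built from an enumeration of a nodup list looks up to (value of) the index
theorem get?_enum_fold (xs : List String) (f : Int → Int) (s : Int)
    (d : PySem.Dict String Int) (hx : xs.Nodup) (k : String) :
    ((PySem.List.enumerate xs s).foldl (fun d p => d.insert p.2 (f p.1)) d).get? k
      = if k ∈ xs then some (f (s + (List.idxOf k xs : Int))) else d.get? k := by
  induction xs generalizing s d with
  | nil => simp [PySem.List.enumerate]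
  | cons x t ih =>
      have hxt : x ∉ t := (List.nodup_cons.mp hx).1
      rw [show PySem.List.enumerate (x :: t) s = (s, x) :: PySem.List.enumerate t (s + 1) by
        simp [PySem.List.enumerate]]
      simp only [List.foldl_cons]
      rw [ih (s + 1) _ (List.nodup_cons.mp hx).2]
      by_cases hkt : k ∈ t
      · have hkx : k ≠ x := fun h => hxt (h ▸ hkt)
        have : List.idxOf k (x :: t) = List.idxOf k t + 1 := by
          simp [Ne.symm hkx]
        simp only [hkt, if_pos, List.mem_cons, hkx, or_true, this]
        congr 2
        push_cast; ring
      · rw [if_neg hkt, PySem.Dict.get?_insert]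
        by_cases hkx : k = x
        · subst hkx
          simp
        · simp [hkx, hkt]

-- ===== the main computation, shared notation =====

-- the two halves of A's final list, for a given unique key list
def pvP (all_keys : List String) : List String :=
  pvPriority.filter (fun k => all_keys.contains k)

def pvN (all_keys : List String) : List String :=
  all_keys.filter (fun k => !(pvP all_keys).contains k)

theorem pvPriority_nodup : pvPriority.Nodup := by decide

theorem pvP_sub (all_keys : List String) : ∀ k ∈ pvP all_keys, k ∈ all_keys := by
  intro k hk
  have := List.of_mem_filter hk
  exact List.contains_iff_mem.mp this

theorem mem_pvN (all_keys k') (h : k' ∈ pvN all_keys) :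
    k' ∈ all_keys ∧ k' ∉ pvPriority := by
  have h1 := List.mem_of_mem_filter h
  have h2 := List.of_mem_filter h
  refine ⟨h1, fun hp => ?_⟩
  have hmem : k' ∈ pvP all_keys := List.mem_filter.mpr ⟨hp, List.contains_iff_mem.mpr h1⟩
  rw [List.contains_iff_mem.mpr hmem] at h2
  simp at h2

-- A's pre-slice list is a permutation of all_keys
theorem perm_PN (all_keys : List String) (hn : all_keys.Nodup) :
    (pvP all_keys ++ pvN all_keys).Perm all_keys := by
  have hPnd : (pvP all_keys).Nodup := List.Nodup.filter _ pvPriority_nodup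
  have hNnd : (pvN all_keys).Nodup := List.Nodup.filter _ hn
  have hnd : (pvP all_keys ++ pvN all_keys).Nodup := by
    rw [List.nodup_append]
    refine ⟨hPnd, hNnd, ?_⟩
    intro a ha b hb hab
    subst hab
    have := List.of_mem_filter hb
    simp at this
    exact this ha
  rw [List.perm_ext_iff_of_nodup hnd hn]
  intro a
  constructor
  · intro h
    rcases List.mem_append.mp h with h | h
    · exact pvP_sub _ _ h
    · exact (mem_pvN _ _ h).1
  · intro h
    rw [List.mem_append]
    by_cases hp : a ∈ pvP all_keys
    · exact Or.inl hp
    · refine Or.inr (List.mem_filter.mpr ⟨h, ?_⟩)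
      simp [hp]

-- key facts and the sorted characterisation
theorem sorted_eq_PN (all_keys : List String) (hn : all_keys.Nodup)
    (key : String → Int)
    (hkP : ∀ k ∈ pvP all_keys, key k = (List.idxOf k pvPriority : Int))
    (hkN : ∀ k ∈ pvN all_keys, key k = (pvPriority.length : Int) + (List.idxOf k all_keys : Int)) :
    PySem.List.sorted all_keys key = pvP all_keys ++ pvN all_keys := by
  apply PySem.List.sorted_eq_of_perm_of_pairwise_lt
  · exact perm_PN all_keys hn
  · rw [List.pairwise_append]
    refine ⟨?_, ?_, ?_⟩
    · have hsub : (pvP all_keys).Sublist pvPriority := List.filter_sublist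
      have hpw := List.Pairwise.sublist hsub (pairwise_idxOf_of_nodup pvPriority pvPriority_nodup)
      refine hpw.imp_of_mem ?_
      intro a b ha hb hlt
      rw [hkP a ha, hkP b hb]
      exact_mod_cast hlt
    · have hsub : (pvN all_keys).Sublist all_keys := List.filter_sublist
      have hpw := List.Pairwise.sublist hsub (pairwise_idxOf_of_nodup all_keys hn)
      refine hpw.imp_of_mem ?_
      intro a b ha hb hlt
      rw [hkN a ha, hkN b hb]
      omega
    · intro a ha b hb
      rw [hkP a ha, hkN b hb]
      have h1 : List.idxOf a pvPriority < pvPriority.length :=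
        List.idxOf_lt_length_iff.mpr (List.mem_of_mem_filter ha)
      have h2 : (0:Int) ≤ (List.idxOf b all_keys : Int) := Int.natCast_nonneg _
      omega

-- ===== VERDICT (by name: the statement is the Claim_ definition above) =====
theorem pick_columns_spec : Claim_equal_pick_columns := by
  intro rows limit _
  unfold Spec_pick_columns pick_columns pick_columns_alt
  set AK : List String := PySem.List.dedup (rows.flatMap (fun row => row.map Prod.fst)) with hAK
  have hloop : rows.foldl (fun acc row =>
      row.foldl (fun acc2 kv => if acc2.contains kv.1 then acc2 else acc2 ++ [kv.1]) acc) []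
      = AK := by
    rw [foldl_add_flatMap]
    rfl
  have hnAK : AK.Nodup := PySem.List.nodup_dedup _
  simp only [hloop]
  have hs1 : pvPriority.foldl (fun s key =>
      if AK.contains key && !s.contains key then s ++ [key] else s) [] = pvP AK := by
    rw [foldl_seen1 (fun k => AK.contains k) pvPriority [] pvPriority_nodup (by simp)]
    rfl
  rw [hs1, foldl_seen2 AK (pvP AK) hnAK]
  have hkey : PySem.List.sorted AK
      (fun k => if (((PySem.List.enumerate pvPriority).foldl
            (fun d p => d.insert p.2 p.1) PySem.Dict.empty).contains k) then
          ((PySem.List.enumerate pvPriority).foldl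
            (fun d p => d.insert p.2 p.1) PySem.Dict.empty).getD k 0
        else
          ((PySem.List.enumerate AK).foldl
            (fun d p => d.insert p.2 ((pvPriority.length : Int) + p.1)) PySem.Dict.empty).getD k 0)
      = pvP AK ++ pvN AK := by
    apply sorted_eq_PN AK hnAK
    · intro k hk
      have hkpr : k ∈ pvPriority := List.mem_of_mem_filter hk
      have hrank := get?_enum_fold pvPriority (fun i => i) 0 PySem.Dict.empty
        pvPriority_nodup k
      simp only [if_pos hkpr, zero_add] at hrank
      simp [PySem.Dict.contains_eq_isSome_get?, PySem.Dict.getD, hrank]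
    · intro k hk
      obtain ⟨hkA, hkpr⟩ := mem_pvN AK k hk
      have hrank := get?_enum_fold pvPriority (fun i => i) 0 PySem.Dict.empty
        pvPriority_nodup k
      simp only [if_neg hkpr] at hrank
      have hpos := get?_enum_fold AK (fun i => (pvPriority.length : Int) + i) 0
        PySem.Dict.empty hnAK k
      simp only [if_pos hkA, zero_add] at hpos
      rw [PySem.Dict.contains_eq_isSome_get?, hrank,
        show (PySem.Dict.empty : PySem.Dict String Int).get? k = none from rfl]
      simp [PySem.Dict.getD, hpos]
  rw [hkey]
  rfl
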